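-- pv_equiv track=rewrite | github.com/moyinolorunpreciousadegbie/Moyinolorun_Precious_Adegbie | PARTITIONS*********.py | gh
-- ===== SOURCE A (Python) =====
-- def gh(LL):
-- 	Q = []
-- 	ind = 0
-- 	for i in LL:
-- 		Q.append(i)
-- 		if ind == len(LL) - 1 :
-- 			break
-- 		Q.append(0)
-- 		ind += 1
-- 	return Q
-- ===== SOURCE B (Python) =====
-- def gh(LL):
--     out = [0] * (2 * len(LL) - 1)
--     for i, v in enumerate(LL):
--         out[2 * i] = v
--     return out
-- ===== Notes on version B (the rewrite author's own statement) =====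
-- stated objective: alternative
-- what changed: B preallocates a zero-filled array of length 2*len(LL)-1 and scatters each element into its even slot via enumerate, instead of A's incremental append-element-then-zero loop with a break on the last item.
import Mathlib
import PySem

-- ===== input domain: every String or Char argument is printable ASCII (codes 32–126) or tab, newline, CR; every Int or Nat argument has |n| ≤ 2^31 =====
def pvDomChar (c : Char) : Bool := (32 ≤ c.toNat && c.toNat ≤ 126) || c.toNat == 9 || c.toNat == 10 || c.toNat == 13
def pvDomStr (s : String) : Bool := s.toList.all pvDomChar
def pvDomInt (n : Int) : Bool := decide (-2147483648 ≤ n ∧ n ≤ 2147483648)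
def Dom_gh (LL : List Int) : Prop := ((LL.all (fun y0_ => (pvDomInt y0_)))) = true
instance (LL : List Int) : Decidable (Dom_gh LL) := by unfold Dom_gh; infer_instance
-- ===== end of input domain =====

-- B preallocates a zero array of length 2*len(LL)-1 and scatters elements into even slots,
-- instead of A's append-element-then-zero loop with a break on the last item (alternative decomposition, same cost).

-- ===== PORT A =====
-- the for-loop with its break, state = (Q, ind); n = len(LL) is fixed during the loop
def ghLoop (n : Int) : List Int → Int → List Int → List Int
  | [], _, Q => Q
  | i :: rest, ind, Q =>
    let Q := Q ++ [i]
    if ind == n - 1 then Q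
    else ghLoop n rest (ind + 1) (Q ++ [0])

def gh (LL : List Int) : List Int := ghLoop (LL.length : Int) LL 0 []

-- ===== PORT B =====
-- out = [0]*(2*len(LL)-1); for i, v in enumerate(LL): out[2*i] = v
-- (the assignment out[2*i] = v is exact as pySetD here: 0 ≤ 2*i < len(out) always)
def gh_alt (LL : List Int) : List Int :=
  let out := List.replicate (2 * (LL.length : Int) - 1).toNat 0
  (PySem.List.enumerate LL).foldl (fun out iv => PySem.List.pySetD out (2 * iv.1) iv.2) out

-- ===== PRECONDITION & SPEC =====
def Spec_gh (LL : List Int) (out : List Int) : Prop := out = gh_alt LL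
instance (LL : List Int) (out : List Int) : Decidable (Spec_gh LL out) := by unfold Spec_gh; infer_instance

-- ===== CLAIM (what is proved, stated in full; the proofs are below) =====
def Claim_equal_gh : Prop := ∀ (LL : List Int), Dom_gh LL → Spec_gh LL (gh LL)

-- ===== LEMMAS AND PROOFS =====

-- the common specification: interleave a 0 between consecutive elements
def il : List Int → List Int
  | [] => []
  | [a] => [a]
  | a :: b :: rest => a :: 0 :: il (b :: rest)

lemma ghLoop_eq_il (n : Int) : ∀ (l : List Int) (ind : Int) (Q : List Int),
    l ≠ [] → ind + (l.length : Int) = n → ghLoop n l ind Q = Q ++ il l := by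
  intro l
  induction l with
  | nil => intro _ _ h _; exact absurd rfl h
  | cons a rest ih =>
    intro ind Q _ hn
    cases rest with
    | nil =>
      have : ind == n - 1 := by simp at hn ⊢; omega
      simp [ghLoop, this, il]
    | cons b rest' =>
      have hne : (ind == n - 1) = false := by
        simp only [beq_eq_false_iff_ne, ne_eq]
        simp at hn; omega
      have hn' : (ind + 1) + ((b :: rest').length : Int) = n := by
        simp at hn ⊢; omega
      rw [show ghLoop n (a :: b :: rest') ind Q
            = if ind == n - 1 then Q ++ [a]
              else ghLoop n (b :: rest') (ind + 1) (Q ++ [a] ++ [0]) from rfl]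
      rw [hne, if_neg (by simp)]
      rw [ih (ind + 1) (Q ++ [a] ++ [0]) (by simp) hn']
      simp [il]

lemma set_append_cons (pre : List Int) (x : Int) (suf : List Int) (v : Int) :
    (pre ++ x :: suf).set pre.length v = pre ++ v :: suf := by
  induction pre with
  | nil => simp
  | cons p ps ih => simp [ih]

lemma scatter_eq_il : ∀ (l : List Int) (k : Nat) (pre : List Int), l ≠ [] →
    pre.length = 2 * k →
    (PySem.List.enumerate l (k : Int)).foldl
        (fun out iv => PySem.List.pySetD out (2 * iv.1) iv.2)
        (pre ++ List.replicate (2 * l.length - 1) 0)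
      = pre ++ il l := by
  intro l
  induction l with
  | nil => intro _ _ h _; exact absurd rfl h
  | cons a rest ih =>
    intro k pre _ hpre
    have hrep : List.replicate (2 * (a :: rest).length - 1) (0 : Int)
        = 0 :: List.replicate (2 * rest.length) 0 := by
      simp [List.length_cons]
      rw [show 2 * (rest.length + 1) - 1 = (2 * rest.length) + 1 by omega]
      simp [List.replicate_succ]
    have hset : PySem.List.pySetD (pre ++ 0 :: List.replicate (2 * rest.length) 0)
        (2 * (k : Int)) a = pre ++ a :: List.replicate (2 * rest.length) 0 := by
      rw [PySem.List.pySetD_of_nonneg _ _ (by positivity)]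
      have : ((2 : Int) * (k : Nat)).toNat = pre.length := by omega
      rw [this, set_append_cons]
    rw [hrep, PySem.List.enumerate_cons]
    simp only [List.foldl_cons, hset]
    cases rest with
    | nil => simp [PySem.List.enumerate, il]
    | cons b rest' =>
      have hrep2 : List.replicate (2 * (b :: rest').length) (0 : Int)
          = 0 :: List.replicate (2 * (b :: rest').length - 1) 0 := by
        simp [List.length_cons]
        rw [show 2 * (rest'.length + 1) = (2 * (rest'.length + 1) - 1) + 1 by omega]
        simp [List.replicate_succ]
      have h1 : pre ++ a :: List.replicate (2 * (b :: rest').length) (0 : Int)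
          = (pre ++ [a, 0]) ++ List.replicate (2 * (b :: rest').length - 1) 0 := by
        rw [hrep2]; simp
      have h2 : ((k : Int) + 1) = ((k + 1 : Nat) : Int) := by push_cast; ring
      rw [h1, h2, ih (k + 1) (pre ++ [a, 0]) (by simp) (by simp; omega)]
      simp [il]

lemma gh_alt_eq_il (LL : List Int) : gh_alt LL = il LL := by
  cases LL with
  | nil => simp [gh_alt, PySem.List.enumerate, il]
  | cons a rest =>
    have h : ((2 : Int) * ((a :: rest).length : Int) - 1).toNat
        = 2 * (a :: rest).length - 1 := by
      simp [List.length_cons]; omega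
    simp only [gh_alt]
    have := scatter_eq_il (a :: rest) 0 [] (by simp) (by simp)
    simpa [h] using this

-- ===== VERDICT (by name: the statement is the Claim_ definition above) =====
theorem gh_spec : Claim_equal_gh := by
  intro LL _
  show gh LL = gh_alt LL
  rw [gh_alt_eq_il]
  cases LL with
  | nil => rfl
  | cons a rest =>
    exact ghLoop_eq_il ((a :: rest).length : Int) (a :: rest) 0 [] (by simp) (by simp)
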